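-- pv_equiv track=rewrite | github.com/septamedia123-cmd/rep-locator-app | app.py | find_product_column
-- ===== SOURCE A (Python) =====
-- def report_clean(value):
--     return str(value or "").strip()
--
-- def report_norm(value):
--     return report_clean(value).lower()
--
-- def find_product_column(headers):
--     """
--     Finds the most likely product/item column in the raw commission report.
--     """
--     preferred_terms = [
--         "product", "product name", "item", "item name", "sku",
--         "description", "line item", "top product", "ordered product"
--     ]
--
--     normalized_headers = [report_norm(h) for h in headers]
--
--     for term in preferred_terms:
--         for idx, header in enumerate(normalized_headers):
--             if term in header:
--                 return idx
--
--     return None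
-- ===== SOURCE B (Python) =====
-- def find_product_column(headers):
--     """
--     Finds the most likely product/item column in the raw commission report.
--
--     Header-major re-implementation: one pass over the headers, computing each
--     header's best term priority, and keeping the running argmin of
--     (priority, index); earlier headers win ties because later equal
--     priorities never replace the current best.
--     """
--     preferred_terms = [
--         "product", "product name", "item", "item name", "sku",
--         "description", "line item", "top product", "ordered product"
--     ]
--
--     best = None  # (priority, index) of the best-matching header so far
--     for idx, h in enumerate(headers):
--         hn = str(h or "").strip().lower()
--         prio = None
--         for p, term in enumerate(preferred_terms):
--             if term in hn:
--                 prio = p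
--                 break
--         if prio is not None and (best is None or prio < best[0]):
--             best = (prio, idx)
--     return None if best is None else best[1]
-- ===== Notes on version B (the rewrite author's own statement) =====
-- stated objective: alternative
-- what changed: Replaces A's term-major nested scan with early return by a single header-major pass that scores each header (its best term priority) and keeps a running argmin of (priority, index).
import Mathlib
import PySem

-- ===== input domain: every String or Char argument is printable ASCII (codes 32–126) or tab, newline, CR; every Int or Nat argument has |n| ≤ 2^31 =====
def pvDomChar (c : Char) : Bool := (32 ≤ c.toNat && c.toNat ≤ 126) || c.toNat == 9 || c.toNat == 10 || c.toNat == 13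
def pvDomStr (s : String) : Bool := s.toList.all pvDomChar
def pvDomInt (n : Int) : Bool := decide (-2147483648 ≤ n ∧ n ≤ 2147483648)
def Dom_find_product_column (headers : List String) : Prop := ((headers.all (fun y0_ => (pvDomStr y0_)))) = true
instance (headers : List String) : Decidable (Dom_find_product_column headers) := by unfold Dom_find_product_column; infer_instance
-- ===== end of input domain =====

-- B replaces A's term-major nested scan (early return on the first term found in any
-- header) by a single header-major pass keeping a running argmin of (priority, index);
-- same result, an alternative decomposition of the same cost.

-- ===== PORT A =====
-- str(value or "") is the identity on str arguments (falsy "" maps to ""), so only strip remains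
def report_clean (value : String) : String := PySem.Str.strip value

def report_norm (value : String) : String := PySem.Str.lower (report_clean value)

-- inner loop: 'for idx, header in enumerate(normalized_headers): if term in header: return idx'
def pvAInner (term : String) : List String → Int → Option Int
  | [], _ => none
  | h :: hs, idx => if PySem.Str.isIn term h then some idx else pvAInner term hs (idx + 1)

-- outer loop over preferred_terms with early return
def pvAOuter : List String → List String → Option Int
  | [], _ => none
  | t :: ts, hs =>
      match pvAInner t hs 0 with
      | some idx => some idx
      | none => pvAOuter ts hs

def find_product_column (headers : List String) : Option Int :=
  let preferred_terms : List String :=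
    ["product", "product name", "item", "item name", "sku",
     "description", "line item", "top product", "ordered product"]
  let normalized_headers := headers.map report_norm
  pvAOuter preferred_terms normalized_headers

-- ===== PORT B =====
-- Source B inner loop: first p with preferred_terms[p] contained in the normalized header
def pvBPrio (terms : List String) (h : String) (p : Nat) : Option Nat :=
  match terms with
  | [] => none
  | t :: ts => if PySem.Str.isIn t h then some p else pvBPrio ts h (p + 1)

-- Source B main loop: best = running argmin of (priority, index); only a strictly
-- smaller priority replaces best, so the earliest header wins ties
def pvBLoop (terms : List String) : List String → Int → Option (Nat × Int) → Option (Nat × Int)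
  | [], _, best => best
  | h :: hs, idx, best =>
      let hn := PySem.Str.lower (PySem.Str.strip h)
      let best' :=
        match pvBPrio terms hn 0, best with
        | none, b => b
        | some p, none => some (p, idx)
        | some p, some (bp, bi) => if p < bp then some (p, idx) else some (bp, bi)
      pvBLoop terms hs (idx + 1) best'

def find_product_column_alt (headers : List String) : Option Int :=
  let preferred_terms : List String :=
    ["product", "product name", "item", "item name", "sku",
     "description", "line item", "top product", "ordered product"]
  match pvBLoop preferred_terms headers 0 none with
  | none => none
  | some (_, idx) => some idx

-- ===== PRECONDITION & SPEC =====
def Spec_find_product_column (headers : List String) (out : Option Int) : Prop := out = find_product_column_alt headers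
instance (headers : List String) (out : Option Int) : Decidable (Spec_find_product_column headers out) := by unfold Spec_find_product_column; infer_instance

-- ===== CLAIM (what is proved, stated in full; the proofs are below) =====
def Claim_equal_find_product_column : Prop := ∀ (headers : List String), Dom_find_product_column headers → Spec_find_product_column headers (find_product_column headers)

-- ===== LEMMAS AND PROOFS =====

-- A's outer loop with the inner start index generalized (proof helper)
def pvASel (ts : List String) (hs : List String) (i0 : Int) : Option Int :=
  match ts with
  | [] => none
  | t :: ts' =>
      match pvAInner t hs i0 with
      | some idx => some idx
      | none => pvASel ts' hs i0

theorem pvAOuter_eq_sel (ts hs : List String) : pvAOuter ts hs = pvASel ts hs 0 := by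
  induction ts with
  | nil => rfl
  | cons t ts ih => simp [pvAOuter, pvASel, ih]

theorem pvAInner_none_iff (t : String) (l : List String) (i : Int) :
    pvAInner t l i = none ↔ ∀ x ∈ l, PySem.Str.isIn t x = false := by
  induction l generalizing i with
  | nil => simp [pvAInner]
  | cons h hs ih =>
      by_cases hc : PySem.Str.isIn t h
      all_goals rw [PySem.Str.isIn_eq] at hc
      · simp [pvAInner, hc]
      · simp only [Bool.not_eq_true] at hc
        simp [pvAInner, hc, ih]

theorem pvBPrio_shift (ts : List String) (h : String) (p : Nat) :
    pvBPrio ts h (p + 1) = (pvBPrio ts h p).map (· + 1) := by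
  induction ts generalizing p with
  | nil => rfl
  | cons t ts ih =>
      by_cases hc : PySem.Str.isIn t h
      all_goals rw [PySem.Str.isIn_eq] at hc
      · simp [pvBPrio, hc]
      · simp only [Bool.not_eq_true] at hc
        simp [pvBPrio, hc, Option.map_map, ih]

-- ts = [] : the accumulator never changes
theorem pvBLoop_nil (hs : List String) (i : Int) (b : Option (Nat × Int)) :
    pvBLoop [] hs i b = b := by
  induction hs generalizing i with
  | nil => rfl
  | cons h hs ih => simp [pvBLoop, pvBPrio, ih]

-- a best of priority 0 is final: nothing is strictly smaller
theorem pvBLoop_zero (ts : List String) (hs : List String) (i j : Int) :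
    pvBLoop ts hs i (some (0, j)) = some (0, j) := by
  induction hs generalizing i with
  | nil => rfl
  | cons h hs ih =>
      simp only [pvBLoop]
      cases hp : pvBPrio ts (PySem.Str.lower (PySem.Str.strip h)) 0 with
      | none => simpa using ih (i + 1)
      | some p => simpa using ih (i + 1)

-- if the head term matches no header, prepending it shifts every priority by one
theorem pvBLoop_shift (t : String) (ts : List String) (hs : List String)
    (hnone : ∀ x ∈ hs, PySem.Str.isIn t (PySem.Str.lower (PySem.Str.strip x)) = false) :
    ∀ (i : Int) (b : Option (Nat × Int)),
      pvBLoop (t :: ts) hs i (b.map (fun pq => (pq.1 + 1, pq.2))) =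
        (pvBLoop ts hs i b).map (fun pq => (pq.1 + 1, pq.2)) := by
  induction hs with
  | nil => intro i b; rfl
  | cons h hs ih =>
      intro i b
      have hh : PySem.Str.isIn t (PySem.Str.lower (PySem.Str.strip h)) = false :=
        hnone h (by simp)
      have hrest : ∀ x ∈ hs, PySem.Str.isIn t (PySem.Str.lower (PySem.Str.strip x)) = false :=
        fun x hx => hnone x (by simp [hx])
      simp only [pvBLoop, pvBPrio, hh, Bool.false_eq_true, if_false,
        pvBPrio_shift ts (PySem.Str.lower (PySem.Str.strip h)) 0]
      cases hp : pvBPrio ts (PySem.Str.lower (PySem.Str.strip h)) 0 with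
      | none =>
          simp only [Option.map_none]
          exact ih hrest (i + 1) b
      | some p =>
          cases b with
          | none =>
              simp only [Option.map_some, Option.map_none]
              exact ih hrest (i + 1) (some (p, i))
          | some bq =>
              obtain ⟨bp, bi⟩ := bq
              by_cases hlt : p < bp
              · have h1 : p + 1 < bp + 1 := by omega
                simp only [Option.map_some, hlt, if_pos, h1]
                exact ih hrest (i + 1) (some (p, i))
              · have h1 : ¬ (p + 1 < bp + 1) := by omega
                simp only [Option.map_some, hlt, h1]
                exact ih hrest (i + 1) (some (bp, bi))

-- if A's inner scan finds the head term first at index j, B's loop ends at (0, j),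
-- provided the accumulator (built from terms after a non-matching prefix) has priority ≥ 1
theorem pvBLoop_found (t : String) (ts : List String) (j : Int) :
    ∀ (hs : List String) (i : Int) (b : Option (Nat × Int)),
      pvAInner t (hs.map report_norm) i = some j →
      (∀ p q, b = some (p, q) → 1 ≤ p) →
      pvBLoop (t :: ts) hs i b = some (0, j) := by
  intro hs
  induction hs with
  | nil => intro i b h; simp [pvAInner] at h
  | cons h hs ih =>
      intro i b hfind hgood
      rw [List.map_cons, pvAInner] at hfind
      by_cases hc : PySem.Str.isIn t (report_norm h)
      · rw [if_pos hc, Option.some.injEq] at hfind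
        subst hfind
        simp only [pvBLoop, pvBPrio, report_norm, report_clean] at hc ⊢
        rw [if_pos hc]
        cases b with
        | none => exact pvBLoop_zero _ _ _ _
        | some bq =>
            obtain ⟨bp, bi⟩ := bq
            have h1 : (0 : Nat) < bp := by have := hgood bp bi rfl; omega
            simp only [if_pos h1]
            exact pvBLoop_zero _ _ _ _
      · rw [if_neg hc] at hfind
        simp only [Bool.not_eq_true] at hc
        simp only [pvBLoop, pvBPrio, report_norm, report_clean] at hc ⊢
        rw [hc]
        simp only [Bool.false_eq_true, if_false,
          pvBPrio_shift ts (PySem.Str.lower (PySem.Str.strip h)) 0]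
        cases hp : pvBPrio ts (PySem.Str.lower (PySem.Str.strip h)) 0 with
        | none =>
            simp only [Option.map_none]
            exact ih (i + 1) b hfind hgood
        | some p =>
            simp only [Option.map_some]
            cases b with
            | none =>
                exact ih (i + 1) (some (p + 1, i)) hfind
                  (by intro p' q' h'; cases h'; omega)
            | some bq =>
                obtain ⟨bp, bi⟩ := bq
                have h1 : 1 ≤ bp := hgood bp bi rfl
                by_cases hlt : p + 1 < bp
                · simp only [if_pos hlt]
                  exact ih (i + 1) (some (p + 1, i)) hfind
                    (by intro p' q' h'; cases h'; omega)
                · simp only [if_neg hlt]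
                  exact ih (i + 1) (some (bp, bi)) hfind
                    (by intro p' q' h'; cases h'; omega)

-- main lemma: A's (generalized) selection over the normalized headers equals the
-- second component of B's running argmin
theorem pvMain (ts : List String) :
    ∀ (hs : List String) (i0 : Int),
      pvASel ts (hs.map report_norm) i0 = Option.map Prod.snd (pvBLoop ts hs i0 none) := by
  induction ts with
  | nil => intro hs i0; simp [pvASel, pvBLoop_nil]
  | cons t ts ih =>
      intro hs i0
      cases hfind : pvAInner t (hs.map report_norm) i0 with
      | none =>
          have hnone : ∀ x ∈ hs, PySem.Str.isIn t (PySem.Str.lower (PySem.Str.strip x)) = false := by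
            intro x hx
            have := (pvAInner_none_iff t (hs.map report_norm) i0).mp hfind (report_norm x)
              (List.mem_map_of_mem hx)
            simpa [report_norm, report_clean] using this
          have hshift := pvBLoop_shift t ts hs hnone i0 none
          simp only [Option.map_none] at hshift
          calc pvASel (t :: ts) (hs.map report_norm) i0
              = pvASel ts (hs.map report_norm) i0 := by simp [pvASel, hfind]
            _ = Option.map Prod.snd (pvBLoop ts hs i0 none) := ih hs i0
            _ = Option.map Prod.snd ((pvBLoop ts hs i0 none).map (fun pq => (pq.1 + 1, pq.2))) := by
                  cases pvBLoop ts hs i0 none <;> rfl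
            _ = Option.map Prod.snd (pvBLoop (t :: ts) hs i0 none) := by rw [hshift]
      | some j =>
          have hB := pvBLoop_found t ts j hs i0 none hfind (by intro p q h; cases h)
          simp [pvASel, hfind, hB]

-- ===== VERDICT (by name: the statement is the Claim_ definition above) =====
theorem find_product_column_spec : Claim_equal_find_product_column := by
  intro headers _
  unfold Spec_find_product_column find_product_column find_product_column_alt
  simp only [pvAOuter_eq_sel, pvMain]
  cases pvBLoop ["product", "product name", "item", "item name", "sku",
     "description", "line item", "top product", "ordered product"] headers 0 none with
  | none => rfl
  | some bq => obtain ⟨p, i⟩ := bq; rfl
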